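-- pv_equiv track=rewrite | github.com/patrickvando/advent-of-code-2022 | day8_2.py | calc_view
-- ===== SOURCE A (Python) =====
-- def calc_view(lst, should_reverse=False):
--     res = [0] * len(lst)
--     stack = []
--     rang = range(len(lst))
--     if should_reverse:
--         rang = reversed(rang)
--     for k in rang:
--         while stack and lst[k] > lst[stack[-1]]:
--             stack.pop()
--         if stack:
--             res[k] = abs(k - stack[-1])
--         elif should_reverse:
--             res[k] = len(lst) - 1 - k
--         else:
--             res[k] = k
--         stack.append(k)
--     return res
-- ===== SOURCE B (Python) =====
-- def calc_view(lst, should_reverse=False):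
--     n = len(lst)
--     res = []
--     if should_reverse:
--         for k in range(n):
--             j = next((j for j in range(k + 1, n) if lst[j] >= lst[k]), None)
--             res.append(j - k if j is not None else n - 1 - k)
--     else:
--         for k in range(n):
--             j = next((j for j in range(k - 1, -1, -1) if lst[j] >= lst[k]), None)
--             res.append(k - j if j is not None else k)
--     return res
-- ===== Notes on version B (the rewrite author's own statement) =====
-- stated objective: simpler
-- what changed: Replaced the single-pass monotonic-stack computation of each element's viewing distance by a direct per-index scan (next(...) over the neighbouring indices) for the nearest element >= the current one in the iteration direction, with no shared mutable stack or res-array.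
import Mathlib
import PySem

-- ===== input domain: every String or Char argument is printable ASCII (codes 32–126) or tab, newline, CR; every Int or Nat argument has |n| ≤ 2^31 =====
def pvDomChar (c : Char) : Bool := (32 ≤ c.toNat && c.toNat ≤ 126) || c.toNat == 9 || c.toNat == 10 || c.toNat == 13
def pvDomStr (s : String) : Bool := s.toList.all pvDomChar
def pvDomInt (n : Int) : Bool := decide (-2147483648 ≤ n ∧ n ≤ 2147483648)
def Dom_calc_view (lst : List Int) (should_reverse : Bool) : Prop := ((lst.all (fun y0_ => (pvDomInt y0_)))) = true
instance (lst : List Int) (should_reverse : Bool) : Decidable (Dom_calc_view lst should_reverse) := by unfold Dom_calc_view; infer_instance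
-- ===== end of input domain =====

-- B replaces A's single-pass monotonic stack by a per-index directional scan for the
-- nearest element ≥ the current one (simpler, no shared mutable stack state; not faster).

-- ===== PORT A =====
-- The Python stack (append/pop/[-1] at the END) is encoded with the TOP AT THE HEAD:
-- append = cons, stack[-1] = head?, pop = drop the head.
-- 'while stack and lst[k] > lst[stack[-1]]: stack.pop()':
def pvPop (lst : List Int) (k : Int) : List Int → List Int
  | [] => []
  | t :: rest =>
    if PySem.List.pyGetD lst t 0 < PySem.List.pyGetD lst k 0 then pvPop lst k rest
    else t :: rest
-- lst[k] is read with pyGetD: k always lies in range(len(lst)) here, so this is exact.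

-- one iteration of A's for-loop: state = (res, stack)
def pvStep (lst : List Int) (should_reverse : Bool)
    (st : List Int × List Int) (k : Int) : List Int × List Int :=
  let stack := pvPop lst k st.2
  let v : Int :=
    match stack.head? with
    | some t => |k - t|
    | none => if should_reverse then (lst.length : Int) - 1 - k else k
  -- res[k] = v : k is a nonnegative in-range index, so List.set at k.toNat is exact
  (st.1.set k.toNat v, k :: stack)

def calc_view (lst : List Int) (should_reverse : Bool) : List Int :=
  let res : List Int := List.replicate lst.length 0
  let rang := PySem.List.pyRange 0 (lst.length : Int) 1
  let rang := if should_reverse then rang.reverse else rang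
  (rang.foldl (pvStep lst should_reverse) (res, [])).1

-- ===== PORT B =====
-- next((j for j in <direction> if lst[j] >= lst[k]), None)  =  find? on the index list
def calc_view_alt (lst : List Int) (should_reverse : Bool) : List Int :=
  let n := lst.length
  let g : Nat → Int := fun j => lst.getD j 0   -- indices scanned are < n, so exact
  (List.range n).map (fun k =>
    if should_reverse then
      match ((List.range n).drop (k + 1)).find? (fun j => decide (g k ≤ g j)) with
      | some j => (j : Int) - (k : Int)
      | none => (n : Int) - 1 - (k : Int)
    else
      match ((List.range k).reverse).find? (fun j => decide (g k ≤ g j)) with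
      | some j => (k : Int) - (j : Int)
      | none => (k : Int))

-- ===== PRECONDITION & SPEC =====
def Spec_calc_view (lst : List Int) (should_reverse : Bool) (out : List Int) : Prop := out = calc_view_alt lst should_reverse
instance (lst : List Int) (should_reverse : Bool) (out : List Int) : Decidable (Spec_calc_view lst should_reverse out) := by unfold Spec_calc_view; infer_instance

-- ===== CLAIM (what is proved, stated in full; the proofs are below) =====
def Claim_equal_calc_view : Prop := ∀ (lst : List Int) (should_reverse : Bool), Dom_calc_view lst should_reverse → Spec_calc_view lst should_reverse (calc_view lst should_reverse)

-- ===== LEMMAS AND PROOFS =====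

-- nearest "time" s < t (searching downward from t-1) whose value is ≥ x
def pvNd (h : Nat → Int) (x : Int) : Nat → Option Nat
  | 0 => none
  | t + 1 => if x ≤ h t then some t else pvNd h x t

-- specification of the stack contents (in "time" coordinates, newest first)
def pvGS (h : Nat → Int) : Nat → List Nat
  | 0 => []
  | t + 1 => t :: (pvGS h t).filter (fun s => decide (h t ≤ h s))

-- the value written at time t
def pvV (h : Nat → Int) (t : Nat) : Int :=
  match pvNd h (h t) t with
  | some s => (t : Int) - (s : Int)
  | none => (t : Int)

-- res after t steps, writing value W s at position σ s
def pvRF (σ : Nat → Nat) (W : Nat → Int) (n : Nat) : Nat → List Int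
  | 0 => List.replicate n 0
  | t + 1 => (pvRF σ W n t).set (σ t) (W (t))

theorem pvGS_lt (h : Nat → Int) : ∀ t, ∀ s ∈ pvGS h t, s < t := by
  intro t
  induction t with
  | zero => intro s hs; simp [pvGS] at hs
  | succ t ih =>
    intro s hs
    simp only [pvGS, List.mem_cons] at hs
    rcases hs with rfl | hs
    · omega
    · exact Nat.lt_succ_of_lt (ih s (List.mem_of_mem_filter hs))

theorem pvGS_pairwise (h : Nat → Int) : ∀ t, (pvGS h t).Pairwise (fun a b => h a ≤ h b) := by
  intro t
  induction t with
  | zero => simp [pvGS]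
  | succ t ih =>
    simp only [pvGS]
    refine List.Pairwise.cons ?_ (ih.filter _)
    intro b hb
    have := List.of_mem_filter hb
    simpa using this

theorem pvDropWhile_eq_filter (h : Nat → Int) (x : Int) :
    ∀ l : List Nat, l.Pairwise (fun a b => h a ≤ h b) →
      l.dropWhile (fun s => decide (h s < x)) = l.filter (fun s => decide (x ≤ h s)) := by
  intro l
  induction l with
  | nil => intro _; rfl
  | cons a l ih =>
    intro hp
    rcases List.pairwise_cons.mp hp with ⟨ha, hp'⟩
    by_cases hax : h a < x
    · simp only [List.dropWhile, List.filter, hax, decide_true]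
      have : ¬ x ≤ h a := by omega
      simp [this, ih hp']
    · have hxa : x ≤ h a := by omega
      simp only [List.dropWhile, List.filter, hax, decide_false, hxa, decide_true]
      have : l.filter (fun s => decide (x ≤ h s)) = l := by
        apply List.filter_eq_self.mpr
        intro b hb
        have := ha b hb
        simp; omega
      simp [this]

theorem pvHead_filter_GS (h : Nat → Int) (x : Int) :
    ∀ t, ((pvGS h t).filter (fun s => decide (x ≤ h s))).head? = pvNd h x t := by
  intro t
  induction t with
  | zero => simp [pvGS, pvNd]
  | succ t ih =>
    simp only [pvGS, pvNd, List.filter]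
    by_cases hxt : x ≤ h t
    · simp [hxt]
    · simp only [hxt, decide_false]
      rw [List.filter_filter]
      have : ∀ s, ((decide (x ≤ h s)) && (decide (h t ≤ h s))) = decide (x ≤ h s) := by
        intro s
        by_cases hxs : x ≤ h s
        · have : h t ≤ h s := by omega
          simp [hxs, this]
        · simp [hxs]
      simp only [this]
      exact ih

theorem pvNd_some_lt (h : Nat → Int) (x : Int) :
    ∀ t s, pvNd h x t = some s → s < t := by
  intro t
  induction t with
  | zero => intro s hs; simp [pvNd] at hs
  | succ t ih =>
    intro s hs
    simp only [pvNd] at hs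
    split at hs
    · cases hs; omega
    · exact Nat.lt_succ_of_lt (ih s hs)

theorem pvFind_rev_range (h : Nat → Int) (x : Int) :
    ∀ t, ((List.range t).reverse).find? (fun j => decide (x ≤ h j)) = pvNd h x t := by
  intro t
  induction t with
  | zero => simp [pvNd]
  | succ t ih =>
    rw [List.range_succ, List.reverse_append]
    simp only [List.reverse_singleton, List.singleton_append, List.find?_cons, pvNd]
    by_cases hxt : x ≤ h t
    · simp [hxt]
    · simp [hxt, ih]

theorem pvPop_map (lst : List Int) (idx : Nat → Int) (h : Nat → Int) (t : Nat)
    (hgt : PySem.List.pyGetD lst (idx t) 0 = h t) :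
    ∀ l : List Nat, (∀ s ∈ l, PySem.List.pyGetD lst (idx s) 0 = h s) →
      pvPop lst (idx t) (l.map idx) = (l.dropWhile (fun s => decide (h s < h t))).map idx := by
  intro l
  induction l with
  | nil => intro _; rfl
  | cons a l ih =>
    intro hg
    have hga := hg a (by simp)
    simp only [List.map_cons, pvPop, hga, hgt, List.dropWhile]
    by_cases hc : h a < h t
    · simp only [hc, decide_true]
      exact ih (fun s hs => hg s (by simp [hs]))
    · simp [hc]

theorem pvRF_eq_map (σ : Nat → Nat) (W : Nat → Int) (n : Nat)
    (hσ : ∀ p < n, σ p < n ∧ σ (σ p) = p) :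
    ∀ t ≤ n, pvRF σ W n t = (List.range n).map (fun p => if σ p < t then W (σ p) else 0) := by
  intro t
  induction t with
  | zero =>
    intro _
    apply List.ext_getElem
    · simp [pvRF]
    · intro i h1 h2
      simp [pvRF]
  | succ t ih =>
    intro ht
    have htn : t < n := ht
    rw [pvRF, ih (by omega)]
    apply List.ext_getElem
    · simp
    · intro i h1 h2
      have hin : i < n := by simpa using h2
      have hσt : σ t < n ∧ σ (σ t) = t := hσ t htn
      rw [List.getElem_set]
      by_cases hi : σ t = i
      · subst hi
        have : σ (σ t) < t + 1 := by omega
        simp [List.getElem_map, List.getElem_range, hσt.2]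
      · simp only [if_neg hi]
        simp only [List.getElem_map, List.getElem_range]
        have hne : σ i ≠ t := by
          intro hcon
          have := (hσ i hin).2
          rw [hcon] at this
          exact hi this
        by_cases h3 : σ i < t
        · have : σ i < t + 1 := by omega
          simp [h3, this]
        · have : ¬ σ i < t + 1 := by omega
          simp [h3, this]

-- the main invariant: after t steps of A's fold, res = pvRF and stack = pvGS mapped to indices
theorem pvMain (lst : List Int) (rev : Bool) (idx : Nat → Int) (σ : Nat → Nat) (h : Nat → Int)
    (n : Nat) (hn : n = lst.length)
    (Hget : ∀ s < n, PySem.List.pyGetD lst (idx s) 0 = h s)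
    (Htn : ∀ s < n, (idx s).toNat = σ s)
    (Habs : ∀ s t, s < t → t < n → |idx t - idx s| = (t : Int) - (s : Int))
    (Hdef : ∀ t < n, (if rev then (n : Int) - 1 - idx t else idx t) = (t : Int)) :
    ∀ t ≤ n, ((List.range t).map idx).foldl (pvStep lst rev) (List.replicate n 0, [])
      = (pvRF σ (pvV h) n t, (pvGS h t).map idx) := by
  intro t
  induction t with
  | zero => intro _; simp [pvRF, pvGS]
  | succ t ih =>
    intro ht
    have htn : t < n := ht
    rw [List.range_succ, List.map_append, List.foldl_append, ih (by omega)]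
    simp only [List.map_cons, List.map_nil, List.foldl_cons, List.foldl_nil]
    unfold pvStep
    have hpop : pvPop lst (idx t) ((pvGS h t).map idx)
        = ((pvGS h t).dropWhile (fun s => decide (h s < h t))).map idx := by
      exact pvPop_map lst idx h t (Hget t htn) _
        (fun s hs => Hget s (lt_of_lt_of_le (pvGS_lt h t s hs) (le_of_lt htn)))
    rw [hpop, pvDropWhile_eq_filter h (h t) _ (pvGS_pairwise h t)]
    have hhead : (((pvGS h t).filter (fun s => decide (h t ≤ h s))).map idx).head?
        = (pvNd h (h t) t).map idx := by
      rw [List.head?_map, pvHead_filter_GS]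
    simp only [hhead]
    have hv : (match (pvNd h (h t) t).map idx with
        | some t' => |idx t - t'|
        | none => if rev then (lst.length : Int) - 1 - idx t else idx t) = pvV h t := by
      cases hnd : pvNd h (h t) t with
      | some s =>
        have hst : s < t := pvNd_some_lt h (h t) t s hnd
        simp only [Option.map_some, pvV, hnd]
        exact Habs s t hst htn
      | none =>
        simp only [Option.map_none, pvV, hnd, ← hn]
        exact Hdef t htn
    rw [hv]
    simp only [Prod.mk.injEq]
    constructor
    · show (pvRF σ (pvV h) n t).set (idx t).toNat (pvV h t) = pvRF σ (pvV h) n (t + 1)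
      rw [Htn t htn, pvRF]
    · show idx t :: ((pvGS h t).filter (fun s => decide (h t ≤ h s))).map idx
        = (pvGS h (t + 1)).map idx
      rw [pvGS, List.map_cons]

theorem pvRange_reverse (n : Nat) :
    (List.range n).reverse = (List.range n).map (fun s => n - 1 - s) := by
  apply List.ext_getElem
  · simp
  · intro i h1 h2
    simp only [List.length_reverse, List.length_range] at h1
    simp [List.getElem_reverse, List.getElem_range]

theorem pvRange_bridge (n : Nat) :
    PySem.List.pyRange 0 (n : Int) 1 = (List.range n).map (fun (s : Nat) => (s : Int)) := by
  rw [PySem.List.pyRange_one]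
  norm_num

theorem pvDrop_range (n k : Nat) (hk : k < n) :
    (List.range n).drop (k + 1) = ((List.range (n - 1 - k)).reverse).map (fun s => n - 1 - s) := by
  rw [pvRange_reverse, List.map_map]
  apply List.ext_getElem
  · simp; omega
  · intro i h1 h2
    rw [List.getElem_drop]
    simp only [List.getElem_map, List.getElem_range, Function.comp]
    simp only [List.length_drop, List.length_range] at h1
    omega

-- the forward case
theorem pvForward (lst : List Int) :
    calc_view lst false = calc_view_alt lst false := by
  unfold calc_view calc_view_alt
  simp only [Bool.false_eq_true, if_false]
  set n := lst.length with hn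
  set g : Nat → Int := fun j => lst.getD j 0 with hg
  have Hget : ∀ s < n, PySem.List.pyGetD lst ((s : Nat) : Int) 0 = g s := by
    intro s hs
    rw [PySem.List.pyGetD_of_nonneg lst (i := ((s : Nat) : Int)) 0 (by omega)]
    simp [hg]
  have hmain := pvMain lst false (fun (s : Nat) => (s : Int)) id g n hn.symm Hget
    (by intro s _; simp)
    (by intro s t hst htn
        show |((t : Nat) : Int) - ((s : Nat) : Int)| = ((t : Nat) : Int) - ((s : Nat) : Int)
        have : ((s : Nat) : Int) < ((t : Nat) : Int) := by exact_mod_cast hst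
        rw [abs_of_nonneg (by omega)])
    (by intro t _; simp) n (le_refl n)
  rw [pvRange_bridge, hmain]
  rw [pvRF_eq_map id (pvV g) n (by intro p hp; exact ⟨hp, rfl⟩) n (le_refl n)]
  apply List.map_congr_left
  intro k hk
  simp only [List.mem_range] at hk
  simp only [id, if_pos hk]
  rw [pvFind_rev_range g (g k) k]
  unfold pvV
  cases hnd : pvNd g (g k) k with
  | some s => simp
  | none => simp

-- the reverse case
theorem pvReverse (lst : List Int) :
    calc_view lst true = calc_view_alt lst true := by
  unfold calc_view calc_view_alt
  simp only [reduceIte]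
  set n := lst.length with hn
  set g : Nat → Int := fun j => lst.getD j 0 with hg
  set idx : Nat → Int := fun (s : Nat) => (n : Int) - 1 - (s : Int) with hidx
  set σ : Nat → Nat := fun s => n - 1 - s with hσ
  set h : Nat → Int := fun s => g (n - 1 - s) with hh
  have hrang : (PySem.List.pyRange 0 (n : Int) 1).reverse = (List.range n).map idx := by
    rw [pvRange_bridge, ← List.map_reverse, pvRange_reverse, List.map_map]
    apply List.map_congr_left
    intro s hs
    simp only [List.mem_range] at hs
    simp only [Function.comp, hidx]
    omega
  have Hget : ∀ s < n, PySem.List.pyGetD lst (idx s) 0 = h s := by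
    intro s hs
    have h1 : idx s = ((n - 1 - s : Nat) : Int) := by simp only [hidx]; omega
    rw [h1, PySem.List.pyGetD_of_nonneg lst (i := ((n - 1 - s : Nat) : Int)) 0 (by omega)]
    simp [hh, hg]
  have hmain := pvMain lst true idx σ h n hn.symm Hget
    (by intro s hs; simp only [hidx, hσ]; omega)
    (by intro s t hst htn; simp only [hidx]
        have h1 : ((t : Int)) < n := by exact_mod_cast htn
        have h2 : (s : Int) < t := by exact_mod_cast hst
        rw [show ((n:Int) - 1 - t - ((n:Int) - 1 - s)) = (s : Int) - t by ring]
        rw [abs_sub_comm, abs_of_nonneg (by omega)])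
    (by intro t htn; simp only [hidx]; norm_num) n (le_refl n)
  rw [hrang, hmain]
  rw [pvRF_eq_map σ (pvV h) n (by intro p hp; constructor <;> [simp only [hσ]; simp only [hσ]] <;> omega) n (le_refl n)]
  apply List.map_congr_left
  intro k hk
  simp only [List.mem_range] at hk
  have hσk : σ k < n := by simp only [hσ]; omega
  simp only [if_pos hσk]
  have hb : (List.range n).drop (k + 1) = ((List.range (n - 1 - k)).reverse).map (fun s => n - 1 - s) := pvDrop_range n k hk
  rw [hb, List.find?_map]
  have hpred : ((fun j => decide (g k ≤ g j)) ∘ (fun s => n - 1 - s))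
      = fun s => decide (h (σ k) ≤ h s) := by
    funext s
    simp only [Function.comp, hh, hσ]
    have hkk : n - 1 - (n - 1 - k) = k := by omega
    simp only [hkk]
  rw [hpred, pvFind_rev_range h (h (σ k)) (n - 1 - k)]
  have hσk' : σ k = n - 1 - k := rfl
  unfold pvV
  rw [hσk']
  cases hnd : pvNd h (h (n - 1 - k)) (n - 1 - k) with
  | some s =>
    have hs : s < n - 1 - k := pvNd_some_lt h _ _ s hnd
    simp only [Option.map_some]
    omega
  | none =>
    simp only [Option.map_none]
    omega

-- ===== VERDICT (by name: the statement is the Claim_ definition above) =====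
theorem calc_view_spec : Claim_equal_calc_view := by
  intro lst should_reverse _
  show calc_view lst should_reverse = calc_view_alt lst should_reverse
  cases should_reverse
  · exact pvForward lst
  · exact pvReverse lst
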